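-- pv_equiv track=rewrite | github.com/iarcanar99/Magicite-Babel | text_corrector.py | _is_valid_character_name
-- ===== SOURCE A (Python) =====
-- def _is_valid_character_name(text):
--     """
--     ตรวจสอบว่าข้อความดูเหมือนชื่อตัวละครที่ valid หรือไม่
--     สำหรับรองรับตัวละครใหม่ที่ไม่มีในฐานข้อมูล
--     """
--     if not text or not text.strip():
--         return False
--
--     text = text.strip()
--
--     # ความยาวต้องเหมาะสม (2-30 ตัวอักษร)
--     if len(text) < 2 or len(text) > 30:
--         return False
--
--     # ไม่ควรเป็นตัวเลขล้วน
--     if text.isdigit():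
--         return False
--
--     # ไม่ควรมีสัญลักษณ์แปลกๆ มากเกินไป
--     special_chars = sum(1 for c in text if not (c.isalnum() or c.isspace() or c in "'-_."))
--     if special_chars > 2:
--         return False
--
--     # ไม่ควรมีตัวเลขมากเกินไป
--     digit_count = sum(1 for c in text if c.isdigit())
--     if digit_count > len(text) // 2:
--         return False
--
--     # ผ่านเกณฑ์พื้นฐาน
--     return True
-- ===== SOURCE B (Python) =====
-- def _tally(t, i):
--     # recursively count (digits, allowed chars) in t[i:]
--     if i == len(t):
--         return (0, 0)
--     d, a = _tally(t, i + 1)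
--     c = t[i]
--     return (d + c.isdigit(), a + (c.isalnum() or c.isspace() or c in "'-_."))
--
--
-- def _is_valid_character_name(text):
--     t = text.strip()
--     n = len(t)
--     if n < 2 or n > 30:
--         return False
--     digits, allowed = _tally(t, 0)
--     # special_count = n - allowed; digits <= n//2 == 2*digits <= n, and since
--     # n >= 2 this already rejects an all-digit string (digits == n > n//2),
--     # so no separate isdigit() check is needed.
--     return 2 * digits <= n and n - allowed <= 2
-- ===== Notes on version B (the rewrite author's own statement) =====
-- stated objective: alternative
-- what changed: Replaces A's staged scans and explicit all-digit check with a recursive tally of (digit, allowed) counts over the suffixes of the stripped string, then a single arithmetic verdict 2*digits <= n and n-allowed <= 2; the isdigit() pass disappears because for n >= 2 an all-digit string already violates 2*digits <= n, and specials are derived as n - allowed instead of being counted.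
import Mathlib
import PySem

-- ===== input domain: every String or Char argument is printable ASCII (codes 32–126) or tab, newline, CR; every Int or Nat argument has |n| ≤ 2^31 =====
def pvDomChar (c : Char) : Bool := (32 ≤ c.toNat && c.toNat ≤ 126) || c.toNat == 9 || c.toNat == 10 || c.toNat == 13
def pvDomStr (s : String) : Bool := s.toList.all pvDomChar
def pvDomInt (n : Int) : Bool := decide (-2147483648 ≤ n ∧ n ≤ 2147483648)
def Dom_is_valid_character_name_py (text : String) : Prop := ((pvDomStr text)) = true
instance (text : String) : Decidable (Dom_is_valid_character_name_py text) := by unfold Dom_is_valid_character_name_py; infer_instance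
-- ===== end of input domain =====

-- B replaces A's staged scans and explicit all-digit check with one recursive tally of
-- (digit, allowed) counts and an arithmetic verdict; same return value everywhere.

-- ===== PORT A =====
-- not (c.isalnum() or c.isspace() or c in "'-_.")
def pvIsSpecial (c : Char) : Bool :=
  !(PySem.Chars.isalnum c || PySem.Chars.isspace c || c ∈ "'-_.".toList)

def is_valid_character_name_py (text : String) : Bool :=
  if text.toList.isEmpty || (PySem.Chars.strip text.toList).isEmpty then false
  else
    let t := PySem.Chars.strip text.toList
    if t.length < 2 || t.length > 30 then false
    else if PySem.Chars.strIsdigit t then false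
    else
      let special : Int := (t.map (fun c => if pvIsSpecial c then (1 : Int) else 0)).sum
      if special > 2 then false
      else
        let digits : Int := (t.map (fun c => if PySem.Chars.isdigit c then (1 : Int) else 0)).sum
        if digits > PySem.Int.floordiv t.length 2 then false
        else true

-- ===== PORT B =====
-- c.isalnum() or c.isspace() or c in "'-_."
def pvAllowed (c : Char) : Bool :=
  PySem.Chars.isalnum c || PySem.Chars.isspace c || c ∈ "'-_.".toList

-- recursive tally of (digits, allowed) over the suffix, as in Source B's _tally
def pvTally : List Char → Int × Int
  | [] => (0, 0)
  | c :: rest =>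
    let r := pvTally rest
    (r.1 + (if PySem.Chars.isdigit c then 1 else 0),
     r.2 + (if pvAllowed c then 1 else 0))

def is_valid_character_name_py_alt (text : String) : Bool :=
  let t := PySem.Chars.strip text.toList
  let n : Int := t.length
  if n < 2 || n > 30 then false
  else
    let r := pvTally t
    decide (2 * r.1 ≤ n) && decide (n - r.2 ≤ 2)

-- ===== PRECONDITION & SPEC =====
def Spec_is_valid_character_name_py (text : String) (out : Bool) : Prop := out = is_valid_character_name_py_alt text
instance (text : String) (out : Bool) : Decidable (Spec_is_valid_character_name_py text out) := by unfold Spec_is_valid_character_name_py; infer_instance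

-- ===== CLAIM (what is proved, stated in full; the proofs are below) =====
def Claim_equal_is_valid_character_name_py : Prop := ∀ (text : String), Dom_is_valid_character_name_py text → Spec_is_valid_character_name_py text (is_valid_character_name_py text)

-- ===== LEMMAS AND PROOFS =====

-- B's tally computes the two countP's
theorem pvTally_eq (l : List Char) :
    pvTally l = ((l.countP PySem.Chars.isdigit : Int), (l.countP pvAllowed : Int)) := by
  induction l with
  | nil => simp [pvTally]
  | cons c rest ih =>
    simp only [pvTally, ih, List.countP_cons]
    by_cases h1 : PySem.Chars.isdigit c <;> by_cases h2 : pvAllowed c <;>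
      simp [h1, h2] <;> omega

-- a char is special exactly when it is not allowed
theorem pvIsSpecial_eq_not_allowed (c : Char) : pvIsSpecial c = !pvAllowed c := by
  simp [pvIsSpecial, pvAllowed]

-- allowed and special counts partition the string
theorem pvCount_split (l : List Char) :
    l.countP pvAllowed + l.countP (fun c => !pvAllowed c) = l.length := by
  induction l with
  | nil => simp
  | cons c rest ih =>
    simp only [List.countP_cons, List.length_cons]
    by_cases h : pvAllowed c <;> simp [h] <;> omega

-- ===== VERDICT (by name: the statement is the Claim_ definition above) =====
theorem is_valid_character_name_py_spec : Claim_equal_is_valid_character_name_py := by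
  intro text _
  show is_valid_character_name_py text = is_valid_character_name_py_alt text
  simp only [is_valid_character_name_py, is_valid_character_name_py_alt, pvTally_eq,
    PySem.List.sum_map_ite_one_zero, pvIsSpecial_eq_not_allowed]
  set t := PySem.Chars.strip text.toList with ht
  by_cases hemp : t.isEmpty
  · have h0 : t.length = 0 := by simpa [List.isEmpty_iff_length_eq_zero] using hemp
    simp [hemp, h0]
  · have hne : t ≠ [] := by simpa [List.isEmpty_iff] using hemp
    have htext : ¬ text.toList.isEmpty := by
      intro h
      have : text.toList = [] := by simpa [List.isEmpty_iff] using h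
      apply hne; rw [ht, this]; decide
    have hsum : t.countP pvAllowed + t.countP (fun c => !pvAllowed c) = t.length :=
      pvCount_split t
    have hdig_le : t.countP PySem.Chars.isdigit ≤ t.length := List.countP_le_length
    by_cases hlen : t.length < 2 ∨ t.length > 30
    · rcases hlen with h | h
      · have h1 : t.length ≤ 1 := by omega
        simp [htext, hemp, h1]
      · have h1 : 30 < t.length := h
        simp [htext, hemp, h1]
    · push_neg at hlen
      obtain ⟨h2, h30⟩ := hlen
      have hcA : (decide (t.length < 2) || decide (t.length > 30)) = false := by
        simp; omega
      have hcB : (decide ((t.length : Int) < 2) || decide ((t.length : Int) > 30)) = false := by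
        simp; constructor <;> [exact_mod_cast h2; exact_mod_cast h30]
      have hfd : PySem.Int.floordiv (t.length : Int) 2 = (t.length : Int) / 2 :=
        PySem.Int.floordiv_eq_ediv_of_pos (by omega)
      simp only [htext, hemp, hcA, hcB, hfd, Bool.false_eq_true, if_false]
      by_cases hall : PySem.Chars.strIsdigit t
      · have hde : t.countP PySem.Chars.isdigit = t.length := by
          rw [List.countP_eq_length]
          intro a ha
          have := (by simpa [PySem.Chars.strIsdigit, hemp] using hall :
            t.all PySem.Chars.isdigit = true)
          exact List.all_eq_true.mp this a ha
        have hb1 : ¬ (2 * (t.countP PySem.Chars.isdigit : Int) ≤ (t.length : Int)) := by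
          rw [hde]; push_cast; omega
        simp [hall, hb1]
      · simp only [hall, Bool.false_eq_true, if_false]
        by_cases hsp : ((t.countP (fun c => !pvAllowed c) : Int)) > 2
        · have hb2 : ¬ ((t.length : Int) - (t.countP pvAllowed : Int) ≤ 2) := by
            have := hsum
            push_cast at hsp ⊢
            omega
          simp [hsp, hb2]
        · by_cases hdg : ((t.countP PySem.Chars.isdigit : Int)) > (t.length : Int) / 2
          · have hb1 : ¬ (2 * (t.countP PySem.Chars.isdigit : Int) ≤ (t.length : Int)) := by
              omega
            simp [hsp, hdg, hb1]
          · have hb1 : 2 * (t.countP PySem.Chars.isdigit : Int) ≤ (t.length : Int) := by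
              omega
            have hb2 : (t.length : Int) - (t.countP pvAllowed : Int) ≤ 2 := by
              push_cast at hsp ⊢
              omega
            simp [hsp, hdg, hb1, hb2]
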